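-- pv_equiv track=rewrite | github.com/ASSERT-KTH/Mokav | experiments/pynguin/c4b/single-return/generated_tests/src_466/0/src_466.py | func
-- ===== SOURCE A (Python) =====
-- def func(*args):
--
-- 	size = int(args[0])
-- 	string = args[1]
-- 	list_ = list(string)
-- 	answer = []
-- 	counter = 0
-- 	for i in range(0, size):
-- 	    if (list_[i] == '1'):
-- 	        counter += 1
-- 	    else:
-- 	        answer.append(counter)
-- 	        counter = 0
-- 	answer.append(counter)
-- 	mystring = ''
-- 	for digit in answer:
-- 	    mystring += str(digit)
-- 	return(mystring)
-- ===== SOURCE B (Python) =====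
-- def func(*args):
--     size = int(args[0])
--     string = args[1]
--     chars = list(string)
--     normalized = ''.join('1' if chars[i] == '1' else '\x00' for i in range(size))
--     parts = normalized.split('\x00')
--     return ''.join(str(len(p)) for p in parts)
-- ===== Notes on version B (the rewrite author's own statement) =====
-- stated objective: idiomatic
-- what changed: Replaces the explicit counter-reset accumulator loop with a normalize-then-split pipeline: map each char to '1' or a sentinel, split on the sentinel, and join the part lengths.
import Mathlib
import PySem

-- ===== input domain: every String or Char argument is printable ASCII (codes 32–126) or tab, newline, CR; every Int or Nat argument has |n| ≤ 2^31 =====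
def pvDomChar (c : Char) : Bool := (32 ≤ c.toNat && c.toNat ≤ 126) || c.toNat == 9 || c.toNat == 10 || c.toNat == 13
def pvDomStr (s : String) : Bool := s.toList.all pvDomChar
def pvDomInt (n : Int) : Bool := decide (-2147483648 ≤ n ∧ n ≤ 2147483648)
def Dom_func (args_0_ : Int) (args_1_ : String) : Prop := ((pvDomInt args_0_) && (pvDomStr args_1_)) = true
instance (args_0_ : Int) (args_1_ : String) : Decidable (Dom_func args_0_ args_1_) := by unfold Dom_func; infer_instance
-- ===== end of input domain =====

-- B replaces A's explicit counter-reset loop by a normalize-then-split pipeline (map to '1'/sentinel,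
-- split on the sentinel, join the part lengths); same cost, more idiomatic.

-- ===== PORT A =====
def func (args_0_ : Int) (args_1_ : String) : String :=
  let size := args_0_
  let list_ := args_1_.toList
  -- for i in range(0, size): list_[i]; pyGet? = none is Python's IndexError, excluded by Pre_func
  let st := (PySem.List.pyRange 0 size 1).foldl
    (fun (st : List Int × Int) i =>
      match PySem.List.pyGet? list_ i with
      | some c => if c = '1' then (st.1, st.2 + 1) else (st.1 ++ [st.2], 0)
      | none => st)
    ([], 0)
  let answer := st.1 ++ [st.2]
  -- mystring += str(digit)
  String.mk (answer.foldl (fun acc d => acc ++ (PySem.Int.toStr d).toList) [])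

-- ===== PORT B =====
def func_alt (args_0_ : Int) (args_1_ : String) : String :=
  let size := args_0_
  let chars := args_1_.toList
  -- normalized = ''.join('1' if chars[i]=='1' else '\x00' for i in range(size)); none = IndexError, excluded by Pre_func
  let normalized := (PySem.List.pyRange 0 size 1).map
    (fun i =>
      match PySem.List.pyGet? chars i with
      | some c => if c = '1' then '1' else '\x00'
      | none => '\x00')
  let parts := PySem.Chars.splitOn normalized ['\x00']
  String.mk (PySem.Chars.join [] (parts.map (fun p => (PySem.Int.toStr (p.length : Int)).toList)))

-- ===== PRECONDITION & SPEC =====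
-- Pre_func excludes size > len(string), on which both Pythons raise IndexError.
def Pre_func (args_0_ : Int) (args_1_ : String) : Prop :=
  args_0_ ≤ (args_1_.toList.length : Int)
instance (args_0_ : Int) (args_1_ : String) : Decidable (Pre_func args_0_ args_1_) := by
  unfold Pre_func; infer_instance

def pvWitness_func : Int × String := (3, "101")

def Spec_func (args_0_ : Int) (args_1_ : String) (out : String) : Prop := out = func_alt args_0_ args_1_
instance (args_0_ : Int) (args_1_ : String) (out : String) : Decidable (Spec_func args_0_ args_1_ out) := by unfold Spec_func; infer_instance

-- ===== CLAIM (what is proved, stated in full; the proofs are below) =====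
def Claim_equal_func : Prop := ∀ (args_0_ : Int) (args_1_ : String), Dom_func args_0_ args_1_ → Pre_func args_0_ args_1_ → Spec_func args_0_ args_1_ (func args_0_ args_1_)

-- ===== LEMMAS AND PROOFS =====

-- the list of run lengths of '1's that A's counter loop produces, starting from counter c
def pvRuns : Int → List Char → List Int
  | c, [] => [c]
  | c, x :: xs => if x = '1' then pvRuns (c + 1) xs else c :: pvRuns 0 xs

-- split on '\x00' with the current (already reversed) piece as accumulator
def pvSplitNul : List Char → List Char → List (List Char)
  | pre, [] => [pre]
  | pre, c :: rest => if c = '\x00' then pre :: pvSplitNul [] rest else pvSplitNul (pre ++ [c]) rest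

-- A's state fold characterised by pvRuns
theorem pv_foldA (t : List Char) : ∀ (ans : List Int) (c : Int),
    (let r := t.foldl (fun (st : List Int × Int) x =>
        if x = '1' then (st.1, st.2 + 1) else (st.1 ++ [st.2], 0)) (ans, c);
     r.1 ++ [r.2]) = ans ++ pvRuns c t := by
  induction t with
  | nil => intro ans c; simp [pvRuns]
  | cons x xs ih =>
    intro ans c
    simp only [List.foldl_cons, pvRuns]
    by_cases hx : x = '1'
    · simpa [hx] using ih ans (c + 1)
    · simpa [hx] using ih (ans ++ [c]) 0

-- lengths of the sentinel-split of the normalised list are pvRuns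
theorem pv_splitNul_lengths (t : List Char) : ∀ (pre : List Char),
    (pvSplitNul pre (t.map (fun x => if x = '1' then '1' else '\x00'))).map
        (fun p => ((p.length : Int))) = pvRuns (pre.length : Int) t := by
  induction t with
  | nil => intro pre; simp [pvSplitNul, pvRuns]
  | cons x xs ih =>
    intro pre
    by_cases hx : x = '1'
    · have : ((pre ++ ['1']).length : Int) = (pre.length : Int) + 1 := by simp
      simp [hx, pvSplitNul, pvRuns, ih (pre ++ ['1']), this]
    · simp [hx, pvSplitNul, pvRuns, ih []]

-- splitOn.go for the single-char sentinel, characterised by pvSplitNul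
theorem pv_go_eq : ∀ (fuel : Nat) (l cur : List Char) (acc : List (List Char)), l.length < fuel →
    PySem.Chars.splitOn.go ['\x00'] fuel l cur acc = acc.reverse ++ pvSplitNul cur.reverse l := by
  intro fuel
  induction fuel with
  | zero => intro l cur acc h; omega
  | succ n ih =>
    intro l cur acc h
    cases l with
    | nil =>
      rw [PySem.Chars.splitOn.go]
      · simp [pvSplitNul]
      · omega
    | cons c rest =>
      have hrec : rest.length < n := by simpa using Nat.lt_of_succ_lt_succ h
      by_cases hc : c = '\x00'
      · rw [PySem.Chars.splitOn.go]
        · simp only [List.isPrefixOf, hc, beq_self_eq_true, Bool.true_and,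
            List.isPrefixOf_nil_left, if_true]
          have hd : List.drop (['\x00'] : List Char).length ('\x00' :: rest) = rest := by simp
          rw [hd, ih rest [] (cur.reverse :: acc) hrec]
          simp [pvSplitNul]
      · rw [PySem.Chars.splitOn.go]
        · simp only [List.isPrefixOf]
          rw [if_neg (by simp; exact fun h' => hc h'.symm), ih rest (c :: cur) acc hrec]
          simp [pvSplitNul, hc]

theorem pv_splitOn_eq (s : List Char) :
    PySem.Chars.splitOn s ['\x00'] = pvSplitNul [] s := by
  rw [PySem.Chars.splitOn, pv_go_eq (s.length + 1) s [] [] (Nat.lt_succ_self _)]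
  simp

-- range-indexed fold over in-range indices is a fold over the prefix
theorem pv_fold_range {σ : Type} (xs : List Char) (f : σ → Char → σ) :
    ∀ (k : Nat), k ≤ xs.length → ∀ (s : σ),
    (List.range k).foldl (fun st (i : Nat) =>
        match PySem.List.pyGet? xs (i : Int) with
        | some c => f st c
        | none => st) s = (xs.take k).foldl f s := by
  intro k
  induction k with
  | zero => intro _ s; simp
  | succ n ih =>
    intro hk s
    have hn : n < xs.length := by omega
    have ht : xs.take (n + 1) = xs.take n ++ [xs[n]] := by
      rw [List.take_add_one, List.getElem?_eq_getElem hn]; rfl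
    rw [List.range_succ, List.foldl_append, ih (by omega), ht, List.foldl_append]
    simp [PySem.List.pyGet?_natCast, List.getElem?_eq_getElem hn]

-- range-indexed map over in-range indices is a map over the prefix
theorem pv_map_range (xs : List Char) (g : Char → Char) (d : Char) :
    ∀ (k : Nat), k ≤ xs.length →
    (List.range k).map (fun (i : Nat) =>
        match PySem.List.pyGet? xs (i : Int) with
        | some c => g c
        | none => d) = (xs.take k).map g := by
  intro k
  induction k with
  | zero => intro _; simp
  | succ n ih =>
    intro hk
    have hn : n < xs.length := by omega
    have ht : xs.take (n + 1) = xs.take n ++ [xs[n]] := by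
      rw [List.take_add_one, List.getElem?_eq_getElem hn]; rfl
    rw [List.range_succ, List.map_append, ih (by omega), ht, List.map_append]
    simp [PySem.List.pyGet?_natCast, List.getElem?_eq_getElem hn]

theorem pv_intercalate_nil (l : List (List Char)) : List.intercalate [] l = l.flatten := by
  induction l with
  | nil => simp [List.intercalate]
  | cons x xs ih =>
    cases xs with
    | nil => simp [List.intercalate]
    | cons y ys =>
      simp only [List.intercalate] at *
      simp_all [List.intersperse]

theorem pv_pyRange_neg (n : Int) (hn : n < 0) : PySem.List.pyRange 0 n 1 = [] := by
  refine List.eq_nil_iff_forall_not_mem.mpr (fun x hx => ?_)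
  have := PySem.List.mem_pyRange_one.mp hx
  omega

-- ===== VERDICT (by name: the statement is the Claim_ definition above) =====
theorem func_spec : Claim_equal_func := by
  intro n s _ hpre
  unfold Spec_func func func_alt
  simp only []
  by_cases hn : 0 ≤ n
  · have hrange : PySem.List.pyRange 0 n 1 = List.map (fun k : Nat => (k : Int)) (List.range n.toNat) := by
      have h := PySem.List.pyRange_zero_natCast n.toNat
      rwa [Int.toNat_of_nonneg hn] at h
    have hk : n.toNat ≤ s.toList.length := by
      have : (n.toNat : Int) ≤ (s.toList.length : Int) := by
        rw [Int.toNat_of_nonneg hn]; exact hpre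
      exact_mod_cast this
    rw [hrange, List.foldl_map, List.map_map]
    rw [pv_fold_range s.toList _ n.toNat hk]
    simp only [Function.comp_def]
    rw [pv_map_range s.toList (fun c => if c = '1' then '1' else '\x00') '\x00' n.toNat hk]
    rw [pv_splitOn_eq]
    rw [pv_foldA (s.toList.take n.toNat) [] 0]
    have hlens := pv_splitNul_lengths (s.toList.take n.toNat) []
    rw [PySem.Chars.join, pv_intercalate_nil]
    rw [show (fun p : List Char => (PySem.Int.toStr (p.length : Int)).toList)
          = (fun d : Int => (PySem.Int.toStr d).toList) ∘ (fun p : List Char => ((p.length : Int))) from rfl,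
        ← List.map_map, hlens]
    rw [PySem.List.foldl_append_eq_flatMap]
    simp [List.flatMap_def]
  · rw [pv_pyRange_neg n (by omega)]
    simp only [List.foldl_nil, List.map_nil]
    decide
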